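-- pv_equiv track=rewrite | github.com/dgjinsu/algorithm | python/프로그래머스/Lv.2/유사 칸토어 비트열.py | f
-- ===== SOURCE A (Python) =====
-- def f(n, r):
--     if n == 1:
--         if r <= 2:
--             return r
--         else:
--             return r - 1
--     div = 5 ** (n-1)
--     area = r // div
--     cnt_1 = 4 ** (n-1)
--
--     if r % div == 0:
--         area -= 1
--
--     if area < 2:
--         return cnt_1 * area + f(n-1, r - div * area)
--     if area > 2:
--         return cnt_1 * (area - 1) + f(n-1, r - div * area)
--     else:
--         return cnt_1 * 2
-- ===== SOURCE B (Python) =====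
-- def f(n, r):
--     count = 0
--     while n > 1:
--         div = 5 ** (n - 1)
--         area = r // div
--         cnt_1 = 4 ** (n - 1)
--         if r % div == 0:
--             area -= 1
--         if area == 2:
--             return count + cnt_1 * 2
--         if area < 2:
--             count += cnt_1 * area
--         else:
--             count += cnt_1 * (area - 1)
--         r -= div * area
--         n -= 1
--     return count + (r if r <= 2 else r - 1)
-- ===== Notes on version B (the rewrite author's own statement) =====
-- stated objective: alternative
-- what changed: Replaced the recursive descent with an explicit while-loop keeping a running accumulator (count), with an early return when area==2 and the n==1 base case folded in after the loop.
-- outside the precondition, e.g. on f(0, 3): A returns 3.4999999999999676, B returns 2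
import Mathlib
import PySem

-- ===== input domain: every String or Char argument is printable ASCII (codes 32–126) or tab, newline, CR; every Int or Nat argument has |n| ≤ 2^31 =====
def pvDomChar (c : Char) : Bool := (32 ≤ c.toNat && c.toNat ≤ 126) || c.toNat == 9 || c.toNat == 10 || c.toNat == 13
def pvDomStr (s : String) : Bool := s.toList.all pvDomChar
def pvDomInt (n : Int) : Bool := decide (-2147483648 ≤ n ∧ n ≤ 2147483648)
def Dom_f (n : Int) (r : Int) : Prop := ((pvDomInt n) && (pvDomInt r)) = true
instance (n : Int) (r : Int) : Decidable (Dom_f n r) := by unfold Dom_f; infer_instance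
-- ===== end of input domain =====

-- B replaces A's recursion by an explicit while-loop with a running accumulator (objective: alternative decomposition).

-- ===== PORT A =====
def f (n : Int) (r : Int) : Int :=
  if n = 1 then
    if r ≤ 2 then r else r - 1
  else if n < 1 then 0  -- totality guard: Python returns a float here (excluded by Pre_f)
  else
    let div := (5 : Int) ^ (n - 1).toNat
    let area0 := PySem.Int.floordiv r div
    let cnt1 := (4 : Int) ^ (n - 1).toNat
    let area := if PySem.Int.mod r div = 0 then area0 - 1 else area0
    if area < 2 then cnt1 * area + f (n - 1) (r - div * area)
    else if area > 2 then cnt1 * (area - 1) + f (n - 1) (r - div * area)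
    else cnt1 * 2
termination_by n.toNat
decreasing_by all_goals omega

-- ===== PORT B =====
def f_altLoop (n : Int) (r : Int) (count : Int) : Int :=
  if n > 1 then
    let div := (5 : Int) ^ (n - 1).toNat
    let area0 := PySem.Int.floordiv r div
    let cnt1 := (4 : Int) ^ (n - 1).toNat
    let area := if PySem.Int.mod r div = 0 then area0 - 1 else area0
    if area = 2 then count + cnt1 * 2
    else
      let count' := if area < 2 then count + cnt1 * area else count + cnt1 * (area - 1)
      f_altLoop (n - 1) (r - div * area) count'
  else count + (if r ≤ 2 then r else r - 1)
termination_by n.toNat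
decreasing_by all_goals omega

def f_alt (n : Int) (r : Int) : Int := f_altLoop n r 0

-- ===== PRECONDITION & SPEC =====
-- Pre_f excludes n < 1, where Python's 5 ** (n-1) is a float and A returns a float, not an int.
def Pre_f (n : Int) (r : Int) : Prop := 1 ≤ n
instance (n : Int) (r : Int) : Decidable (Pre_f n r) := by unfold Pre_f; infer_instance
def pvWitness_f : Int × Int := (2, 7)

def Spec_f (n : Int) (r : Int) (out : Int) : Prop := out = f_alt n r
instance (n : Int) (r : Int) (out : Int) : Decidable (Spec_f n r out) := by unfold Spec_f; infer_instance

-- ===== CLAIM (what is proved, stated in full; the proofs are below) =====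
def Claim_equal_f : Prop := ∀ (n : Int) (r : Int), Dom_f n r → Pre_f n r → Spec_f n r (f n r)

-- ===== LEMMAS AND PROOFS =====
theorem f_altLoop_eq (k : Nat) : ∀ (n r c : Int), n = (k : Int) + 1 → f_altLoop n r c = c + f n r := by
  induction k with
  | zero =>
    intro n r c hn
    subst hn
    rw [f_altLoop, f]
    simp
  | succ k ih =>
    intro n r c hn
    have h1 : ¬ n = 1 := by omega
    have h2 : ¬ n < 1 := by omega
    have h3 : n > 1 := by omega
    rw [f_altLoop, f]
    simp only [h1, h2, h3, if_true, if_false]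
    set div := (5 : Int) ^ (n - 1).toNat with hdiv
    set area0 := PySem.Int.floordiv r div
    set cnt1 := (4 : Int) ^ (n - 1).toNat
    set area := if PySem.Int.mod r div = 0 then area0 - 1 else area0 with harea
    by_cases he : area = 2
    · simp [he]
    · simp only [he, if_false]
      have hrec := ih (n - 1) (r - div * area) (if area < 2 then c + cnt1 * area else c + cnt1 * (area - 1)) (by omega)
      rw [hrec]
      by_cases hlt : area < 2
      · simp only [hlt, if_true]
        have : ¬ area > 2 := by omega
        ring
      · have hgt : area > 2 := by omega
        simp only [hlt, hgt, if_false, if_true]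
        ring

-- ===== VERDICT (by name: the statement is the Claim_ definition above) =====
theorem f_spec : Claim_equal_f := by
  intro n r _ hpre
  unfold Spec_f f_alt
  have hk : n = ((n - 1).toNat : Int) + 1 := by unfold Pre_f at hpre; omega
  rw [f_altLoop_eq (n - 1).toNat n r 0 hk]
  ring
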